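-- pv_equiv track=rewrite | github.com/kbpark9898/Algorithm_Solving | 04_Binary_Search/BJ13397.py | check
-- ===== SOURCE A (Python) =====
-- def check(numbers, mid, target):
--     gugan = 1
--     maximum = numbers[0]
--     minimum = numbers[0]
--     start_index = 0
--
--     for i in range(len(numbers)):
--         cur_gugan = numbers[start_index : i+1]
--         maximum = max(cur_gugan)
--         minimum = min(cur_gugan)
--         if maximum-minimum > mid:
--             gugan += 1
--             start_index = i
--         if gugan >target:
--             return False
--     return True
-- ===== SOURCE B (Python) =====
-- def check(numbers, mid, target):
--     # O(n): maintain running max/min of the current segment incrementally,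
--     # resetting to the current element when a new segment starts.
--     gugan = 1
--     mx = mn = numbers[0]
--     for x in numbers:
--         if x > mx:
--             mx = x
--         if x < mn:
--             mn = x
--         if mx - mn > mid:
--             gugan += 1
--             mx = x
--             mn = x
--         if gugan > target:
--             return False
--     return True
-- ===== Notes on version B (the rewrite author's own statement) =====
-- stated objective: faster
-- what changed: B maintains the running max/min of the current segment incrementally (resetting to the current element on a segment break) instead of re-slicing and re-scanning numbers[start_index:i+1] with max()/min() at every index, turning the quadratic scan into one pass.
-- outside the precondition, e.g. on check([], 0, 1): A raises IndexError, B raises IndexError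
import Mathlib
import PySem

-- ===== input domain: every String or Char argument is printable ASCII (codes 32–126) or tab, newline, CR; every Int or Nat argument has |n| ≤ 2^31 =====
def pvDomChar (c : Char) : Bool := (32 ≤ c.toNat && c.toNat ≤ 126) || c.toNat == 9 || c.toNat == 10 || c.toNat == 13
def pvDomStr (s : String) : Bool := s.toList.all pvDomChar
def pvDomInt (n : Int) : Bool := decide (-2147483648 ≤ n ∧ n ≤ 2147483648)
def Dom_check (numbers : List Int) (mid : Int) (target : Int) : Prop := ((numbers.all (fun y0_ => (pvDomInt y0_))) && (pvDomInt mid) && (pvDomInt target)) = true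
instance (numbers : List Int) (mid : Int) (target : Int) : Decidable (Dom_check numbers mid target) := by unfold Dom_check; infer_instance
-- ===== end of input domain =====

-- B replaces A's per-index re-slice and re-scan (max/min of numbers[start_index:i+1])
-- by an incrementally maintained running max/min, reset on a segment break: one pass instead of a quadratic scan.

-- ===== PORT A =====
-- loop over range(len(numbers)) with state (gugan, start_index); early `return False` short-circuits
def checkA_go (numbers : List Int) (mid target : Int) : List Nat → Int → Nat → Bool
  | [], _, _ => true
  | i :: is, gugan, start =>
    let cur := PySem.List.slice numbers (some (start : Int)) (some ((i : Int) + 1))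
    let maximum := (PySem.List.max? cur (fun y => y)).getD 0   -- slice is nonempty here, so getD never fires
    let minimum := (PySem.List.min? cur (fun y => y)).getD 0
    let gugan' := if maximum - minimum > mid then gugan + 1 else gugan
    let start' := if maximum - minimum > mid then i else start
    if gugan' > target then false
    else checkA_go numbers mid target is gugan' start'

def check (numbers : List Int) (mid : Int) (target : Int) : Bool :=
  match numbers with
  | [] => false   -- Python raises IndexError on numbers[0]; excluded by Pre_check
  | _ :: _ => checkA_go numbers mid target (List.range numbers.length) 1 0

-- ===== PORT B =====
def checkB_go (mid target : Int) : List Int → Int → Int → Int → Bool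
  | [], _, _, _ => true
  | x :: xs, gugan, mx, mn =>
    let mx₁ := if x > mx then x else mx
    let mn₁ := if x < mn then x else mn
    let gugan' := if mx₁ - mn₁ > mid then gugan + 1 else gugan
    let mx₂ := if mx₁ - mn₁ > mid then x else mx₁
    let mn₂ := if mx₁ - mn₁ > mid then x else mn₁
    if gugan' > target then false
    else checkB_go mid target xs gugan' mx₂ mn₂

def check_alt (numbers : List Int) (mid : Int) (target : Int) : Bool :=
  match numbers with
  | [] => false   -- raises IndexError on numbers[0]; excluded by Pre_check
  | h :: _ => checkB_go mid target numbers 1 h h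

-- ===== PRECONDITION & SPEC =====
-- A evaluates numbers[0] before its loop, so it raises IndexError on [] (as does B).
def Pre_check (numbers : List Int) (mid : Int) (target : Int) : Prop := numbers ≠ []
instance (numbers : List Int) (mid : Int) (target : Int) : Decidable (Pre_check numbers mid target) := by unfold Pre_check; infer_instance

def pvWitness_check : List Int × Int × Int := ([1, 5, 4, 6, 2], 2, 3)

def Spec_check (numbers : List Int) (mid : Int) (target : Int) (out : Bool) : Prop := out = check_alt numbers mid target
instance (numbers : List Int) (mid : Int) (target : Int) (out : Bool) : Decidable (Spec_check numbers mid target out) := by unfold Spec_check; infer_instance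

-- ===== CLAIM (what is proved, stated in full; the proofs are below) =====
def Claim_equal_check : Prop := ∀ (numbers : List Int) (mid : Int) (target : Int), Dom_check numbers mid target → Pre_check numbers mid target → Spec_check numbers mid target (check numbers mid target)

-- ===== LEMMAS AND PROOFS =====

-- max/min of the inclusive segment numbers[s..k] (s ≤ k < length), written as a fold seeded at numbers[s]
def segMax (numbers : List Int) (s k : Nat) : Int :=
  ((numbers.drop (s + 1)).take (k - s)).foldl max (numbers.getD s 0)
def segMin (numbers : List Int) (s k : Nat) : Int :=
  ((numbers.drop (s + 1)).take (k - s)).foldl min (numbers.getD s 0)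

lemma slice_seg (numbers : List Int) (s k : Nat) (hs : s ≤ k) (hk : k < numbers.length) :
    PySem.List.slice numbers (some (s : Int)) (some ((k : Int) + 1))
      = numbers.getD s 0 :: (numbers.drop (s + 1)).take (k - s) := by
  have h1 : ((k : Int) + 1) = ((k + 1 : Nat) : Int) := by push_cast; ring
  rw [h1, PySem.List.slice_natCast]
  have hslen : s < numbers.length := lt_of_le_of_lt hs hk
  have hd : numbers.drop s = numbers[s] :: numbers.drop (s + 1) :=
    List.drop_eq_getElem_cons hslen
  have ht : k + 1 - s = (k - s) + 1 := by omega
  rw [hd, ht, List.take_succ_cons]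
  simp [List.getD, hslen]

lemma maxA_eq (numbers : List Int) (s k : Nat) (hs : s ≤ k) (hk : k < numbers.length) :
    (PySem.List.max? (PySem.List.slice numbers (some (s : Int)) (some ((k : Int) + 1)))
        (fun y => y)).getD 0 = segMax numbers s k := by
  rw [slice_seg numbers s k hs hk, PySem.List.max?_id_cons]
  rfl

lemma minA_eq (numbers : List Int) (s k : Nat) (hs : s ≤ k) (hk : k < numbers.length) :
    (PySem.List.min? (PySem.List.slice numbers (some (s : Int)) (some ((k : Int) + 1)))
        (fun y => y)).getD 0 = segMin numbers s k := by
  rw [slice_seg numbers s k hs hk, PySem.List.min?_id_cons]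
  rfl

lemma segMax_succ (numbers : List Int) (s k : Nat) (hs : s ≤ k) (hk : k + 1 < numbers.length) :
    segMax numbers s (k + 1) = max (segMax numbers s k) (numbers.getD (k + 1) 0) := by
  unfold segMax
  have ht : k + 1 - s = (k - s) + 1 := by omega
  have hidx : s + 1 + (k - s) = k + 1 := by omega
  have hlen : k - s < (numbers.drop (s + 1)).length := by
    rw [List.length_drop]; omega
  rw [ht, List.take_add_one, List.getElem?_drop, hidx,
      List.getElem?_eq_getElem hk]
  simp [List.foldl_append, List.getD, List.getElem?_eq_getElem hk]

lemma segMin_succ (numbers : List Int) (s k : Nat) (hs : s ≤ k) (hk : k + 1 < numbers.length) :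
    segMin numbers s (k + 1) = min (segMin numbers s k) (numbers.getD (k + 1) 0) := by
  unfold segMin
  have ht : k + 1 - s = (k - s) + 1 := by omega
  have hidx : s + 1 + (k - s) = k + 1 := by omega
  have hlen : k - s < (numbers.drop (s + 1)).length := by
    rw [List.length_drop]; omega
  rw [ht, List.take_add_one, List.getElem?_drop, hidx,
      List.getElem?_eq_getElem hk]
  simp [List.foldl_append, List.getD, List.getElem?_eq_getElem hk]

lemma segMax_self_succ (numbers : List Int) (k : Nat) (hk : k + 1 < numbers.length) :
    segMax numbers k (k + 1) = max (numbers.getD k 0) (numbers.getD (k + 1) 0) := by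
  have := segMax_succ numbers k k le_rfl hk
  simpa [segMax] using this

lemma segMin_self_succ (numbers : List Int) (k : Nat) (hk : k + 1 < numbers.length) :
    segMin numbers k (k + 1) = min (numbers.getD k 0) (numbers.getD (k + 1) 0) := by
  have := segMin_succ numbers k k le_rfl hk
  simpa [segMin] using this

lemma go_eq (numbers : List Int) (mid target : Int) :
    ∀ (m k s : Nat) (gugan mx mn : Int),
      k + m = numbers.length → s ≤ k →
      (k < numbers.length → max mx (numbers.getD k 0) = segMax numbers s k) →
      (k < numbers.length → min mn (numbers.getD k 0) = segMin numbers s k) →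
      checkA_go numbers mid target (List.range' k m) gugan s
        = checkB_go mid target (numbers.drop k) gugan mx mn := by
  intro m
  induction m with
  | zero =>
    intro k s gugan mx mn hlen _ _ _
    have : numbers.length ≤ k := by omega
    rw [List.drop_of_length_le this]
    rfl
  | succ m ih =>
    intro k s gugan mx mn hlen hs hmx hmn
    have hk : k < numbers.length := by omega
    have hdrop : numbers.drop k = numbers[k] :: numbers.drop (k + 1) :=
      List.drop_eq_getElem_cons hk
    have hx : numbers.getD k 0 = numbers[k] := by
      simp [List.getD, List.getElem?_eq_getElem hk]
    rw [List.range'_succ, hdrop]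
    show (let cur := PySem.List.slice numbers (some (s : Int)) (some ((k : Int) + 1));
          let maximum := (PySem.List.max? cur (fun y => y)).getD 0;
          let minimum := (PySem.List.min? cur (fun y => y)).getD 0;
          let gugan' := if maximum - minimum > mid then gugan + 1 else gugan;
          let start' := if maximum - minimum > mid then k else s;
          if gugan' > target then false
          else checkA_go numbers mid target (List.range' (k + 1) m) gugan' start') = _
    show _ = (let mx₁ := if numbers[k] > mx then numbers[k] else mx;
              let mn₁ := if numbers[k] < mn then numbers[k] else mn;
              let gugan' := if mx₁ - mn₁ > mid then gugan + 1 else gugan;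
              let mx₂ := if mx₁ - mn₁ > mid then numbers[k] else mx₁;
              let mn₂ := if mx₁ - mn₁ > mid then numbers[k] else mn₁;
              if gugan' > target then false
              else checkB_go mid target (numbers.drop (k + 1)) gugan' mx₂ mn₂)
    simp only [maxA_eq numbers s k hs hk, minA_eq numbers s k hs hk]
    have hmx' : (if numbers[k] > mx then numbers[k] else mx) = segMax numbers s k := by
      rw [← hmx hk, hx]; split_ifs <;> omega
    have hmn' : (if numbers[k] < mn then numbers[k] else mn) = segMin numbers s k := by
      rw [← hmn hk, hx]; split_ifs <;> omega
    rw [hmx', hmn']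
    by_cases hbreak : segMax numbers s k - segMin numbers s k > mid
    · simp only [if_pos hbreak]
      by_cases hret : gugan + 1 > target
      · simp [hret]
      · simp only [if_neg hret]
        exact ih (k + 1) k (gugan + 1) numbers[k] numbers[k] (by omega) (by omega)
          (fun h => by rw [segMax_self_succ numbers k h, hx])
          (fun h => by rw [segMin_self_succ numbers k h, hx])
    · simp only [if_neg hbreak]
      by_cases hret : gugan > target
      · simp [hret]
      · simp only [if_neg hret]
        exact ih (k + 1) s gugan (segMax numbers s k) (segMin numbers s k) (by omega) (by omega)
          (fun h => (segMax_succ numbers s k hs h).symm)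
          (fun h => (segMin_succ numbers s k hs h).symm)

-- ===== VERDICT (by name: the statement is the Claim_ definition above) =====
theorem check_spec : Claim_equal_check := by
  intro numbers mid target _ hpre
  unfold Spec_check
  match numbers, hpre with
  | h :: t, _ =>
    show checkA_go (h :: t) mid target (List.range (h :: t).length) 1 0
          = checkB_go mid target (h :: t) 1 h h
    have hlen : 0 < (h :: t).length := by simp
    have := go_eq (h :: t) mid target (h :: t).length 0 0 1 h h (by omega) (by omega)
      (fun _ => by simp [segMax, List.getD]) (fun _ => by simp [segMin, List.getD])
    rw [List.range_eq_range', this, List.drop_zero]
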